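-- pv_equiv track=rewrite | github.com/matslindh/codingchallenges | adventofcode2017/04.py | is_valid_passcode_and_anagram
-- ===== SOURCE A (Python) =====
-- from collections import Counter
--
-- def is_valid_passcode(pc):
--     c = Counter(pc.split())
--
--     for k in c:
--         if c[k] > 1:
--             return False
--
--     return True
--
-- def is_valid_passcode_and_anagram(pc):
--     if not is_valid_passcode(pc):
--         return False
--
--     versions = {}
--
--     for w in pc.split():
--         c = Counter(w)
--         kv = ''
--
--         for k in sorted(c.keys()):
--             kv += k + str(c[k])
--
--         if kv in versions:
--             return False
--
--         versions[kv] = True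
--
--     return True
-- ===== SOURCE B (Python) =====
-- def is_valid_passcode_and_anagram(pc):
--     seen = set()
--     for w in pc.split():
--         key = ''.join(sorted(w))
--         if key in seen:
--             return False
--         seen.add(key)
--     return True
-- ===== Notes on version B (the rewrite author's own statement) =====
-- stated objective: simpler
-- what changed: Merged A's two passes (a Counter-based duplicate-word pass plus a per-word char+count key-string pass with a versions dict) into a single pass that uses the sorted word as canonical anagram key against one seen-set, which also catches duplicate words.
-- intended difference: On passphrases whose words are pairwise non-anagrams but where two words' char+count encodings collide (possible when words contain digit characters, e.g. '1111111111112 1222222222222222222222' both encode to '11221'), A returns False although the words are not anagrams, while B returns the intended True. — e.g. on is_valid_passcode_and_anagram("1111111111112 1222222222222222222222"): A returns false, B returns true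
import Mathlib
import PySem

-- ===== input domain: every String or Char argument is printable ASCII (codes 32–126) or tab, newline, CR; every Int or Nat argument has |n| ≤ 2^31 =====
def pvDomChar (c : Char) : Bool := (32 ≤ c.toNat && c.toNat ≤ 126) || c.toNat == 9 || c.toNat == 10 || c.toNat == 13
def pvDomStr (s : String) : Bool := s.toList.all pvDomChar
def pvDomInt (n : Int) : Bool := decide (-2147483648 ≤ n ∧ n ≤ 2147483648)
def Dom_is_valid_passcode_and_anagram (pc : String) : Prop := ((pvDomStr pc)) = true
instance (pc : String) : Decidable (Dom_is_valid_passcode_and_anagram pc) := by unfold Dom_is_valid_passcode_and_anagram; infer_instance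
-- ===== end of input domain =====

-- B merges A's two passes (duplicate-word pass + char+count-key anagram pass) into one pass keyed by
-- the sorted word; on the rare inputs where A's digit-ambiguous char+count key collides for
-- non-anagram words, B returns the intended True (see D_ below).

-- ===== PORT A =====
-- strings are handled on the List Char side throughout (kv and dict keys as List Char);
-- 'kv += k + str(c[k])' is 'kv ++ k :: PySem.Int.toChars (c.getD k 0)' — same characters.
def is_valid_passcode (pc : String) : Bool :=
  let c := PySem.Dict.counter (PySem.Str.split₀ pc)
  c.keys.foldl (fun ok k => if 1 < c.getD k 0 then false else ok) true

def pvKvA (w : String) : List Char :=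
  let c := PySem.Dict.counter w.toList
  (PySem.List.sorted c.keys (fun k => k)).foldl
    (fun kv k => kv ++ (k :: PySem.Int.toChars (c.getD k 0))) []

def pvLoopA : List String → PySem.Dict (List Char) Bool → Bool
  | [], _ => true
  | w :: ws, versions =>
      let kv := pvKvA w
      if versions.contains kv then false
      else pvLoopA ws (versions.insert kv true)

def is_valid_passcode_and_anagram (pc : String) : Bool :=
  if !is_valid_passcode pc then false
  else pvLoopA (PySem.Str.split₀ pc) PySem.Dict.empty

-- ===== PORT B =====
-- ''.join(sorted(w)) as a List Char key
def pvSortKey (w : String) : List Char := PySem.List.sorted w.toList (fun c => c)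

def pvLoopB : List String → PySem.Set (List Char) → Bool
  | [], _ => true
  | w :: ws, seen =>
      let key := pvSortKey w
      if seen.contains key then false
      else pvLoopB ws (PySem.Set.add seen key)

def is_valid_passcode_and_anagram_alt (pc : String) : Bool :=
  pvLoopB (PySem.Str.split₀ pc) PySem.Set.empty

-- ===== PRECONDITION & SPEC =====
-- D_'s own vocabulary, independent of either port: a word's character histogram written out as
-- <char><decimal count> over the distinct characters in increasing order (the encoding A uses as
-- its anagram key), stated as a flatMap over the input word.
def pvHKey (w : String) : List Char :=
  (PySem.List.sorted (PySem.Set.ofList w.toList) (fun k => k)).flatMap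
    (fun k => k :: PySem.Int.toChars (w.toList.count k : Int))

-- On passphrases whose words are pairwise non-anagrams (no two words' character lists are
-- permutations of each other) but where two words' char+count histogram encodings still collide
-- (possible only with digit characters, e.g. '1'*12+'2' and '1'+'2'*21 both encode to "11221"),
-- A returns False although no two words are anagrams, while B returns the intended True.
def D_is_valid_passcode_and_anagram (pc : String) : Prop :=
  (PySem.Str.split₀ pc).Pairwise (fun a b => ¬ a.toList.Perm b.toList) ∧
    ¬ ((PySem.Str.split₀ pc).map pvHKey).Nodup
instance (pc : String) : Decidable (D_is_valid_passcode_and_anagram pc) := by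
  unfold D_is_valid_passcode_and_anagram; infer_instance

def Spec_is_valid_passcode_and_anagram (pc : String) (out : Bool) : Prop :=
  ¬ D_is_valid_passcode_and_anagram pc → out = is_valid_passcode_and_anagram_alt pc
instance (pc : String) (out : Bool) : Decidable (Spec_is_valid_passcode_and_anagram pc out) := by
  unfold Spec_is_valid_passcode_and_anagram; infer_instance

def pvDiffWitness_is_valid_passcode_and_anagram : String :=
  "1111111111112 1222222222222222222222"
def pvDiffWitnessOut_is_valid_passcode_and_anagram : Bool × Bool := (false, true)

-- ===== CLAIM (what is proved, stated in full; the proofs are below) =====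
def Claim_unchanged_is_valid_passcode_and_anagram : Prop := ∀ (pc : String), Dom_is_valid_passcode_and_anagram pc → Spec_is_valid_passcode_and_anagram pc (is_valid_passcode_and_anagram pc)
def Claim_changed_is_valid_passcode_and_anagram : Prop := Dom_is_valid_passcode_and_anagram (pvDiffWitness_is_valid_passcode_and_anagram) ∧ D_is_valid_passcode_and_anagram (pvDiffWitness_is_valid_passcode_and_anagram) ∧ is_valid_passcode_and_anagram (pvDiffWitness_is_valid_passcode_and_anagram) = pvDiffWitnessOut_is_valid_passcode_and_anagram.1 ∧ is_valid_passcode_and_anagram_alt (pvDiffWitness_is_valid_passcode_and_anagram) = pvDiffWitnessOut_is_valid_passcode_and_anagram.2 ∧ pvDiffWitnessOut_is_valid_passcode_and_anagram.1 ≠ pvDiffWitnessOut_is_valid_passcode_and_anagram.2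
def Claim_exact_is_valid_passcode_and_anagram : Prop := ∀ (pc : String), Dom_is_valid_passcode_and_anagram pc → D_is_valid_passcode_and_anagram pc → is_valid_passcode_and_anagram pc ≠ is_valid_passcode_and_anagram_alt pc

-- ===== LEMMAS AND PROOFS =====

lemma pvLoopB_char (ws : List String) (s : PySem.Set (List Char)) :
    pvLoopB ws s =
      decide ((ws.map pvSortKey).Nodup ∧ ∀ k ∈ ws.map pvSortKey, k ∉ s) := by
  induction ws generalizing s with
  | nil => simp [pvLoopB]
  | cons w ws ih =>
    by_cases h : pvSortKey w ∈ s
    · have hc : s.contains (pvSortKey w) = true := by simp [h]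
      simp [pvLoopB, h]
    · have hc : s.contains (pvSortKey w) = false := by simp [h]
      simp only [pvLoopB, hc, Bool.false_eq_true, if_false, ih, List.map_cons,
        List.nodup_cons, List.mem_cons, decide_eq_decide]
      simp only [PySem.Set.mem_add]
      constructor
      · rintro ⟨hnd, hall⟩
        refine ⟨⟨fun hmem => (hall _ hmem) (Or.inr rfl), hnd⟩, ?_⟩
        rintro k (rfl | hk)
        · exact h
        · exact fun hin => (hall k hk) (Or.inl hin)
      · rintro ⟨⟨hnm, hnd⟩, hall⟩
        refine ⟨hnd, fun k hk => ?_⟩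
        rintro (hin | rfl)
        · exact hall k (Or.inr hk) hin
        · exact hnm hk

lemma pvLoopA_char (ws : List String) (d : PySem.Dict (List Char) Bool) :
    pvLoopA ws d =
      decide ((ws.map pvKvA).Nodup ∧ ∀ k ∈ ws.map pvKvA, ¬ d.contains k = true) := by
  induction ws generalizing d with
  | nil => simp [pvLoopA]
  | cons w ws ih =>
    by_cases hc : d.contains (pvKvA w) = true
    · simp [pvLoopA, hc]
    · simp only [pvLoopA, hc, Bool.false_eq_true, if_false, ih, List.map_cons,
        List.nodup_cons, List.mem_cons, decide_eq_decide,
        PySem.Dict.contains_insert, Bool.or_eq_true, beq_iff_eq]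
      constructor
      · rintro ⟨hnd, hall⟩
        refine ⟨⟨fun hmem => (hall _ hmem) (Or.inl rfl), hnd⟩, ?_⟩
        rintro k (rfl | hk)
        · exact hc
        · exact fun hin => (hall k hk) (Or.inr hin)
      · rintro ⟨⟨hnm, hnd⟩, hall⟩
        refine ⟨hnd, fun k hk => ?_⟩
        rintro (rfl | hin)
        · exact hnm hk
        · exact hall k (Or.inr hk) hin

lemma pvValid_char (pc : String) :
    is_valid_passcode pc = decide ((PySem.Str.split₀ pc).Nodup) := by
  show (List.foldl (fun ok k => if 1 < (PySem.Dict.counter (PySem.Str.split₀ pc)).getD k 0 then false else ok) true (PySem.Dict.counter (PySem.Str.split₀ pc)).keys) = _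
  rw [PySem.List.foldl_ite_false_eq]
  simp only [Bool.true_and, PySem.Dict.keys_counter, PySem.Dict.getD_counter]
  by_cases hn : (PySem.Str.split₀ pc).Nodup
  · have hall := List.nodup_iff_count_le_one.mp hn
    simp only [hn, decide_true, Bool.not_eq_true', List.any_eq_false]
    intro x hx
    have := hall x
    simp only [decide_eq_true_eq, not_lt]
    exact_mod_cast this
  · obtain ⟨a, ha⟩ := not_forall.mp (fun h => hn (List.nodup_iff_count_le_one.mpr h))
    have ham : a ∈ PySem.Str.split₀ pc := by
      by_contra hm
      exact ha (by simp [List.count_eq_zero_of_not_mem hm])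
    simp only [hn, decide_false, Bool.not_eq_false', List.any_eq_true]
    exact ⟨a, by simp [PySem.Set.mem_ofList, ham], by simp only [decide_eq_true_eq]; omega⟩

lemma pvKvA_eq (w : String) : pvKvA w = pvHKey w := by
  show (PySem.List.sorted (PySem.Dict.counter w.toList).keys (fun k => k)).foldl
      (fun kv k => kv ++ (k :: PySem.Int.toChars ((PySem.Dict.counter w.toList).getD k 0))) []
    = pvHKey w
  rw [PySem.Dict.keys_counter, PySem.List.foldl_append_eq_flatMap]
  simp only [PySem.Dict.getD_counter, List.nil_append]
  rfl

-- pvHKey depends only on the multiset of characters of the word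
lemma pvHKey_congr {a b : String} (h : a.toList.Perm b.toList) : pvHKey a = pvHKey b := by
  unfold pvHKey
  have hs : PySem.List.sorted (PySem.Set.ofList a.toList) (fun k => k)
      = PySem.List.sorted (PySem.Set.ofList b.toList) (fun k => k) := by
    refine (PySem.List.sorted_id_eq_sorted_id_iff_perm _ _).mpr ?_
    refine (List.perm_ext_iff_of_nodup (PySem.Set.nodup_ofList _) (PySem.Set.nodup_ofList _)).mpr ?_
    intro x
    simp only [PySem.Set.mem_ofList]
    exact h.mem_iff
  rw [hs]
  apply List.flatMap_congr
  intro k _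
  rw [h.count_eq]

-- no two anagram words is exactly distinctness of the sorted-word keys
lemma pvPairwise_iff (ws : List String) :
    ws.Pairwise (fun a b => ¬ a.toList.Perm b.toList) ↔ (ws.map pvSortKey).Nodup := by
  unfold List.Nodup
  rw [List.pairwise_map]
  constructor
  · refine fun h => h.imp fun {a b} hnp heq => ?_
    exact hnp ((PySem.List.sorted_id_eq_sorted_id_iff_perm _ _).mp heq)
  · refine fun h => h.imp fun {a b} hne hperm => ?_
    exact hne ((PySem.List.sorted_id_eq_sorted_id_iff_perm _ _).mpr hperm)

lemma pvHist_of_sort (ws : List String) :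
    (ws.map pvHKey).Nodup → ws.Pairwise (fun a b => ¬ a.toList.Perm b.toList) := by
  intro h
  rw [List.Nodup, List.pairwise_map] at h
  exact h.imp fun {a b} hne hperm => hne (pvHKey_congr hperm)

lemma pvA_char (pc : String) :
    is_valid_passcode_and_anagram pc =
      decide (((PySem.Str.split₀ pc).map pvHKey).Nodup) := by
  have hmap : pvKvA = pvHKey := funext pvKvA_eq
  unfold is_valid_passcode_and_anagram
  rw [pvValid_char, pvLoopA_char, hmap]
  by_cases hn : (PySem.Str.split₀ pc).Nodup
  · simp [hn, PySem.Dict.empty]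
  · have hm : ¬ ((PySem.Str.split₀ pc).map pvHKey).Nodup :=
      fun h => hn (h.of_map pvHKey)
    simp [hn, hm]

lemma pvB_char (pc : String) :
    is_valid_passcode_and_anagram_alt pc =
      decide (((PySem.Str.split₀ pc).map pvSortKey).Nodup) := by
  unfold is_valid_passcode_and_anagram_alt
  rw [pvLoopB_char]
  simp [PySem.Set.empty]

-- ===== VERDICT (by name: the statement is the Claim_ definition above) =====
theorem is_valid_passcode_and_anagram_spec : Claim_unchanged_is_valid_passcode_and_anagram := by
  intro pc _ hnD
  rw [pvA_char, pvB_char]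
  by_cases hS : ((PySem.Str.split₀ pc).map pvSortKey).Nodup
  · have hA : ((PySem.Str.split₀ pc).map pvHKey).Nodup := by
      by_contra hA
      exact hnD ⟨(pvPairwise_iff _).mpr hS, hA⟩
    simp [hS, hA]
  · have hA : ¬ ((PySem.Str.split₀ pc).map pvHKey).Nodup :=
      fun h => hS ((pvPairwise_iff _).mp (pvHist_of_sort _ h))
    simp [hS, hA]

theorem is_valid_passcode_and_anagram_changed : Claim_changed_is_valid_passcode_and_anagram := by
  unfold Claim_changed_is_valid_passcode_and_anagram; decide

theorem is_valid_passcode_and_anagram_tight : Claim_exact_is_valid_passcode_and_anagram := by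
  intro pc _ hD
  rw [pvA_char, pvB_char]
  simp [(pvPairwise_iff _).mp hD.1, hD.2]
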